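-- pv_equiv track=rewrite | github.com/JK42JJ/warfront | warfront/core/algorithms.py | binary_search_sim
-- ===== SOURCE A (Python) =====
-- from typing import Any, Dict, List, Optional, Tuple
--
-- def binary_search_sim(
--     arr: List[int],
--     target: int,
-- ) -> List[Tuple[Any, str, str]]:
--     """Binary search simulation.
--
--     Args:
--         arr:    Sorted integer array.
--         target: Value to search for.
--
--     Returns steps as ((lo, hi, mid), description, extra_info).
--     """
--     lo, hi = 0, len(arr) - 1
--     steps: List[Tuple[Any, str, str]] = []
--
--     steps.append((
--         (lo, hi, -1),
--         f"Search Started | Range: [{lo}, {hi}] | Target: {target}",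
--         f"Array length: {len(arr)}",
--     ))
--
--     while lo <= hi:
--         mid = (lo + hi) // 2
--         steps.append((
--             (lo, hi, mid),
--             f"Checking median arr[{mid}]={arr[mid]}",
--             f"Target: {target}",
--         ))
--
--         if arr[mid] == target:
--             steps.append((
--                 (mid, mid, mid),
--                 f"Target {target} Found! Index: {mid}",
--                 f"arr[{mid}] = {arr[mid]}",
--             ))
--             return steps
--         elif arr[mid] < target:
--             lo = mid + 1
--             steps.append((
--                 (lo, hi, mid),
--                 f"Searching Right | New Range: [{lo}, {hi}]",
--                 f"arr[{mid}]={arr[mid]} < target={target}",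
--             ))
--         else:
--             hi = mid - 1
--             steps.append((
--                 (lo, hi, mid),
--                 f"Searching Left | New Range: [{lo}, {hi}]",
--                 f"arr[{mid}]={arr[mid]} > target={target}",
--             ))
--
--     steps.append((
--         (lo, hi, -1),
--         f"Target {target} Not Found",
--         f"Search exhausted all possibilities",
--     ))
--     return steps
-- ===== SOURCE B (Python) =====
-- from typing import Any, List, Tuple
--
-- # B: staged decomposition — first compute an abstract event trace (no strings),
-- # then render every event to its step tuple in a second pass.
--
-- def _events(arr, target, lo, hi):
--     """Abstract trace for range [lo, hi]: tuples (kind, lo, hi, mid, value)."""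
--     if lo > hi:
--         return [("miss", lo, hi, -1, 0)]
--     mid = (lo + hi) // 2
--     v = arr[mid]
--     head = ("check", lo, hi, mid, v)
--     if v == target:
--         return [head, ("found", mid, mid, mid, v)]
--     if v < target:
--         return [head, ("right", mid + 1, hi, mid, v)] + _events(arr, target, mid + 1, hi)
--     return [head, ("left", lo, mid - 1, mid, v)] + _events(arr, target, lo, mid - 1)
--
--
-- def _render(target, ev):
--     kind, lo, hi, mid, v = ev
--     if kind == "start":
--         return ((lo, hi, -1),
--                 f"Search Started | Range: [{lo}, {hi}] | Target: {target}",
--                 f"Array length: {v}")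
--     if kind == "check":
--         return ((lo, hi, mid),
--                 f"Checking median arr[{mid}]={v}",
--                 f"Target: {target}")
--     if kind == "found":
--         return ((mid, mid, mid),
--                 f"Target {target} Found! Index: {mid}",
--                 f"arr[{mid}] = {v}")
--     if kind == "right":
--         return ((lo, hi, mid),
--                 f"Searching Right | New Range: [{lo}, {hi}]",
--                 f"arr[{mid}]={v} < target={target}")
--     if kind == "left":
--         return ((lo, hi, mid),
--                 f"Searching Left | New Range: [{lo}, {hi}]",
--                 f"arr[{mid}]={v} > target={target}")
--     return ((lo, hi, -1),
--             f"Target {target} Not Found",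
--             f"Search exhausted all possibilities")
--
--
-- def binary_search_sim(
--     arr: List[int],
--     target: int,
-- ) -> List[Tuple[Any, str, str]]:
--     n = len(arr)
--     evs = [("start", 0, n - 1, -1, n)] + _events(arr, target, 0, n - 1)
--     return [_render(target, e) for e in evs]
-- ===== Notes on version B (the rewrite author's own statement) =====
-- stated objective: alternative
-- what changed: Replaced A's single iterative loop that interleaves search state with string formatting by a staged design: a recursive pass builds an abstract event trace (kind, lo, hi, mid, value) with no strings, and a separate rendering pass maps each event to its step tuple.
import Mathlib
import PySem

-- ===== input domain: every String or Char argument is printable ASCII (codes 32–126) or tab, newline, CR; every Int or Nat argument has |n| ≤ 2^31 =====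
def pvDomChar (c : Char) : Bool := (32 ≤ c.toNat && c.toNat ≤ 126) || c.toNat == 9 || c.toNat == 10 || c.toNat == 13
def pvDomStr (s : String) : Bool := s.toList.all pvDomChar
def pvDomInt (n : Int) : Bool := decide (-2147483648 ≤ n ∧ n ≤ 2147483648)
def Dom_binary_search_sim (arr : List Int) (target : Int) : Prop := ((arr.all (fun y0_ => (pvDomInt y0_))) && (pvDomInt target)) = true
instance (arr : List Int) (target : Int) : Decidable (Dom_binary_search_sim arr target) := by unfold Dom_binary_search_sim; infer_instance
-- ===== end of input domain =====

-- B replaces A's single loop that interleaves search state with string formatting by two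
-- staged passes: an abstract event trace (no strings) and a separate rendering map.
-- Return values are identical (A is total).

-- ===== PORT A =====
-- A's while-loop: state (lo, hi, steps); strings built inline, exactly as in the Python.
def pvLoopA (arr : List Int) (target lo hi : Int) (steps : List ((Int × Int × Int) × String × String)) :
    List ((Int × Int × Int) × String × String) :=
  if h : lo ≤ hi then
    let mid := PySem.Int.floordiv (lo + hi) 2
    let v := (PySem.List.pyGet? arr mid).getD 0
    let steps := steps ++ [((lo, hi, mid),
      "Checking median arr[" ++ PySem.Int.toStr mid ++ "]=" ++ PySem.Int.toStr v,
      "Target: " ++ PySem.Int.toStr target)]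
    if v = target then
      steps ++ [((mid, mid, mid),
        "Target " ++ PySem.Int.toStr target ++ " Found! Index: " ++ PySem.Int.toStr mid,
        "arr[" ++ PySem.Int.toStr mid ++ "] = " ++ PySem.Int.toStr v)]
    else if v < target then
      pvLoopA arr target (mid + 1) hi (steps ++ [((mid + 1, hi, mid),
        "Searching Right | New Range: [" ++ PySem.Int.toStr (mid + 1) ++ ", " ++ PySem.Int.toStr hi ++ "]",
        "arr[" ++ PySem.Int.toStr mid ++ "]=" ++ PySem.Int.toStr v ++ " < target=" ++ PySem.Int.toStr target)])
    else
      pvLoopA arr target lo (mid - 1) (steps ++ [((lo, mid - 1, mid),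
        "Searching Left | New Range: [" ++ PySem.Int.toStr lo ++ ", " ++ PySem.Int.toStr (mid - 1) ++ "]",
        "arr[" ++ PySem.Int.toStr mid ++ "]=" ++ PySem.Int.toStr v ++ " > target=" ++ PySem.Int.toStr target)])
  else
    steps ++ [((lo, hi, -1),
      "Target " ++ PySem.Int.toStr target ++ " Not Found",
      "Search exhausted all possibilities")]
termination_by (hi - lo + 1).toNat
decreasing_by
  · have := PySem.Int.floordiv_two_mid_bounds h; omega
  · have := PySem.Int.floordiv_two_mid_bounds h; omega

def binary_search_sim (arr : List Int) (target : Int) : List ((Int × Int × Int) × String × String) :=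
  pvLoopA arr target 0 ((arr.length : Int) - 1)
    [((0, (arr.length : Int) - 1, -1),
      "Search Started | Range: [" ++ PySem.Int.toStr 0 ++ ", " ++ PySem.Int.toStr ((arr.length : Int) - 1) ++ "] | Target: " ++ PySem.Int.toStr target,
      "Array length: " ++ PySem.Int.toStr (arr.length : Int))]

-- ===== PORT B =====
-- Pass 1: abstract event trace for the range [lo, hi]: (kind, lo, hi, mid, value)
def pvEvents (arr : List Int) (target lo hi : Int) : List (String × Int × Int × Int × Int) :=
  if h : lo > hi then
    [("miss", lo, hi, -1, 0)]
  else
    let mid := PySem.Int.floordiv (lo + hi) 2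
    let v := (PySem.List.pyGet? arr mid).getD 0
    ("check", lo, hi, mid, v) ::
      (if v = target then [("found", mid, mid, mid, v)]
       else if v < target then ("right", mid + 1, hi, mid, v) :: pvEvents arr target (mid + 1) hi
       else ("left", lo, mid - 1, mid, v) :: pvEvents arr target lo (mid - 1))
termination_by (hi - lo + 1).toNat
decreasing_by
  · have := PySem.Int.floordiv_two_mid_bounds (by omega : lo ≤ hi); omega
  · have := PySem.Int.floordiv_two_mid_bounds (by omega : lo ≤ hi); omega

-- Pass 2: render one event to its step tuple
def pvRender (target : Int) (ev : String × Int × Int × Int × Int) :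
    (Int × Int × Int) × String × String :=
  match ev with
  | (kind, lo, hi, mid, v) =>
    if kind = "start" then
      ((lo, hi, -1),
       "Search Started | Range: [" ++ PySem.Int.toStr lo ++ ", " ++ PySem.Int.toStr hi ++ "] | Target: " ++ PySem.Int.toStr target,
       "Array length: " ++ PySem.Int.toStr v)
    else if kind = "check" then
      ((lo, hi, mid),
       "Checking median arr[" ++ PySem.Int.toStr mid ++ "]=" ++ PySem.Int.toStr v,
       "Target: " ++ PySem.Int.toStr target)
    else if kind = "found" then
      ((mid, mid, mid),
       "Target " ++ PySem.Int.toStr target ++ " Found! Index: " ++ PySem.Int.toStr mid,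
       "arr[" ++ PySem.Int.toStr mid ++ "] = " ++ PySem.Int.toStr v)
    else if kind = "right" then
      ((lo, hi, mid),
       "Searching Right | New Range: [" ++ PySem.Int.toStr lo ++ ", " ++ PySem.Int.toStr hi ++ "]",
       "arr[" ++ PySem.Int.toStr mid ++ "]=" ++ PySem.Int.toStr v ++ " < target=" ++ PySem.Int.toStr target)
    else if kind = "left" then
      ((lo, hi, mid),
       "Searching Left | New Range: [" ++ PySem.Int.toStr lo ++ ", " ++ PySem.Int.toStr hi ++ "]",
       "arr[" ++ PySem.Int.toStr mid ++ "]=" ++ PySem.Int.toStr v ++ " > target=" ++ PySem.Int.toStr target)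
    else
      ((lo, hi, -1),
       "Target " ++ PySem.Int.toStr target ++ " Not Found",
       "Search exhausted all possibilities")

def binary_search_sim_alt (arr : List Int) (target : Int) : List ((Int × Int × Int) × String × String) :=
  (("start", 0, (arr.length : Int) - 1, -1, (arr.length : Int)) ::
      pvEvents arr target 0 ((arr.length : Int) - 1)).map (pvRender target)

-- ===== PRECONDITION & SPEC =====
def Spec_binary_search_sim (arr : List Int) (target : Int) (out : List ((Int × Int × Int) × String × String)) : Prop := out = binary_search_sim_alt arr target
instance (arr : List Int) (target : Int) (out : List ((Int × Int × Int) × String × String)) : Decidable (Spec_binary_search_sim arr target out) := by unfold Spec_binary_search_sim; infer_instance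

-- ===== CLAIM =====
def Claim_equal_binary_search_sim : Prop := ∀ (arr : List Int) (target : Int), Dom_binary_search_sim arr target → Spec_binary_search_sim arr target (binary_search_sim arr target)

-- ===== LEMMAS AND PROOFS =====

-- loop-vs-staged invariant: the loop with accumulator `steps` produces `steps ++` the
-- rendered event trace of the same range
theorem pvLoopA_eq_render_events (arr : List Int) (target : Int) :
    ∀ (n : Nat) (lo hi : Int) (steps : List ((Int × Int × Int) × String × String)),
      (hi - lo + 1).toNat ≤ n →
      pvLoopA arr target lo hi steps = steps ++ (pvEvents arr target lo hi).map (pvRender target) := by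
  intro n
  induction n with
  | zero =>
    intro lo hi steps hn
    have hlt : lo > hi := by omega
    rw [pvLoopA, pvEvents]
    simp [hlt, not_le.mpr hlt, pvRender]
  | succ k ih =>
    intro lo hi steps hn
    rw [pvLoopA, pvEvents]
    by_cases h : lo ≤ hi
    · have hmid := PySem.Int.floordiv_two_mid_bounds h
      rw [dif_pos h, dif_neg (by omega : ¬ lo > hi)]
      dsimp only
      split_ifs with h1 h3
      · simp [pvRender]
      · rw [ih (PySem.Int.floordiv (lo + hi) 2 + 1) hi _ (by omega)]
        simp [pvRender]
      · rw [ih lo (PySem.Int.floordiv (lo + hi) 2 - 1) _ (by omega)]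
        simp [pvRender]
    · have h2 : lo > hi := by omega
      simp [h, h2, pvRender]

-- ===== VERDICT =====
theorem binary_search_sim_spec : Claim_equal_binary_search_sim := by
  intro arr target _
  unfold Spec_binary_search_sim binary_search_sim binary_search_sim_alt
  rw [pvLoopA_eq_render_events arr target ((arr.length : Int) - 0 + 1).toNat 0 _ _ (by omega)]
  simp [pvRender]
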